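-- pv_equiv track=rewrite | github.com/seharaki/custom-web-ui | src/app.py | encode_urls_in_references
-- ===== SOURCE A (Python) =====
-- def encode_urls_in_references(references):
--     parts = references.split("URL: ")
--     encoded_references = parts[0]
--     for part in parts[1:]:
--         end_pos = part.find("\n")
--         if (end_pos == -1):
--             end_pos = len(part)
--         url = part[:end_pos].strip()
--         if url.endswith(".json"):
--             url = url[:-5]  # Remove '.json' from the end of the URL
--         encoded_url = url.replace(' ', '%20')
--         rest = part[end_pos:]
--         encoded_references += "URL: " + encoded_url + rest
--     return encoded_references
-- ===== SOURCE B (Python) =====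
-- def encode_urls_in_references(references):
--     # Single left-to-right scan: copy text verbatim until a "URL: " marker,
--     # then capture the URL (up to the next newline or next marker) and encode it.
--     def _encode(url):
--         url = url.strip()
--         if url.endswith(".json"):
--             url = url[:-5]
--         return url.replace(' ', '%20')
--
--     s = references
--     n = len(s)
--     out = []
--     i = 0
--     while i < n:
--         if s.startswith("URL: ", i):
--             k = i + 5
--             while k < n and s[k] != '\n' and not s.startswith("URL: ", k):
--                 k += 1
--             out.append("URL: " + _encode(s[i + 5:k]))
--             i = k
--         else:
--             out.append(s[i])
--             i += 1
--     return ''.join(out)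
-- ===== Notes on version B (the rewrite author's own statement) =====
-- stated objective: alternative
-- what changed: Replaces split('URL: ')-then-rebuild over the parts list with a single character-level left-to-right scanner that copies text verbatim and, at each marker, captures the URL up to the next newline or next marker and encodes it in place.
import Mathlib
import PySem

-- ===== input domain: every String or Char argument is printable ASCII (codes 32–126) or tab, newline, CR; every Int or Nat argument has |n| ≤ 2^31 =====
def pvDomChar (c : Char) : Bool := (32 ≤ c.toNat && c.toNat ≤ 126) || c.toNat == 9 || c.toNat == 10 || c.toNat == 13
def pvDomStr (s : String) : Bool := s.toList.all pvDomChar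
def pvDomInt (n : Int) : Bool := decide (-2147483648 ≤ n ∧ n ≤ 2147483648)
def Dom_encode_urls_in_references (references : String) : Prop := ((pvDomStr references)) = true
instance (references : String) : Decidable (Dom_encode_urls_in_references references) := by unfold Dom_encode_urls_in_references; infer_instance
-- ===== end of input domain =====

-- B replaces A's split("URL: ")-and-rebuild loop with a single character-level scanner
-- (copy verbatim; at each marker capture the URL up to the next newline or marker and encode it).

-- ===== PORT A =====
-- A's loop body: encoded_references += "URL: " + encoded_url + rest
def aEncodePart (acc part : List Char) : List Char :=
  let end_pos0 := PySem.Chars.find part "\n".toList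
  let end_pos : Int := if end_pos0 = -1 then (part.length : Int) else end_pos0
  let url := PySem.Chars.strip (PySem.List.slice part none (some end_pos))
  let url := if PySem.Chars.endswith url ".json".toList then PySem.List.slice url none (some (-5)) else url
  let encoded_url := PySem.Chars.replace url " ".toList "%20".toList
  let rest := PySem.List.slice part (some end_pos) none
  acc ++ ("URL: ".toList ++ encoded_url ++ rest)

def encode_urls_in_references (references : String) : String :=
  let parts := PySem.Chars.splitOn references.toList "URL: ".toList
  -- parts[0]: split with a nonempty separator never returns an empty list, so headI is exact
  String.ofList (parts.tail.foldl aEncodePart parts.headI)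

-- ===== PORT B =====
-- B's _encode helper
def bEncode (url0 : List Char) : List Char :=
  let url := PySem.Chars.strip url0
  let url := if PySem.Chars.endswith url ".json".toList then PySem.List.slice url none (some (-5)) else url
  PySem.Chars.replace url " ".toList "%20".toList

-- B's inner while loop: advance k until end, a newline, or the next "URL: " marker;
-- returns (captured chars s[i+5:k], remaining suffix s[k:])
def bCapture (cs : List Char) : List Char × List Char :=
  match cs with
  | [] => ([], [])
  | c :: rest =>
    if c = '\n' || PySem.Chars.startswith (c :: rest) "URL: ".toList then ([], c :: rest)
    else ((c :: (bCapture rest).1), (bCapture rest).2)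

theorem bCapture_snd_length_le (cs : List Char) : (bCapture cs).2.length ≤ cs.length := by
  induction cs with
  | nil => simp [bCapture]
  | cons c rest ih =>
    simp only [bCapture]
    split
    · simp
    · simpa using Nat.le_succ_of_le ih

-- B's outer while loop over the character sequence
def bLoop (cs : List Char) : List Char :=
  match cs with
  | [] => []
  | c :: rest =>
    if PySem.Chars.startswith (c :: rest) "URL: ".toList then
      "URL: ".toList ++ bEncode (bCapture ((c :: rest).drop 5)).1
        ++ bLoop (bCapture ((c :: rest).drop 5)).2
    else c :: bLoop rest
termination_by cs.length
decreasing_by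
  · have h := bCapture_snd_length_le ((c :: rest).drop 5)
    simp at h ⊢
    omega
  · simp

def encode_urls_in_references_alt (references : String) : String :=
  String.ofList (bLoop references.toList)

-- ===== PRECONDITION & SPEC =====
def Spec_encode_urls_in_references (references : String) (out : String) : Prop := out = encode_urls_in_references_alt references
instance (references : String) (out : String) : Decidable (Spec_encode_urls_in_references references out) := by unfold Spec_encode_urls_in_references; infer_instance

-- ===== CLAIM (what is proved, stated in full; the proofs are below) =====
def Claim_equal_encode_urls_in_references : Prop := ∀ (references : String), Dom_encode_urls_in_references references → Spec_encode_urls_in_references references (encode_urls_in_references references)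

-- ===== LEMMAS AND PROOFS =====

-- first newline position of a part (or its length), as A computes it
def endIdx (p : List Char) : Nat :=
  if PySem.Chars.find p "\n".toList = -1 then p.length else (PySem.Chars.find p "\n".toList).toNat

-- what A appends for one part (acc-free form)
def procP (p : List Char) : List Char :=
  "URL: ".toList ++ bEncode (List.take (endIdx p) p) ++ List.drop (endIdx p) p

theorem procEnc (acc p : List Char) : aEncodePart acc p = acc ++ procP p := by
  by_cases h : PySem.Chars.find p "\n".toList = -1
  · simp only [aEncodePart, procP, endIdx, bEncode, h, if_pos]
    rw [PySem.List.slice_to p (by exact Int.natCast_nonneg _),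
      PySem.List.slice_from p (by exact Int.natCast_nonneg _)]
    simp
  · have h0 : 0 ≤ PySem.Chars.find p "\n".toList := by
      have := PySem.Chars.neg_one_le_find p "\n".toList
      omega
    simp only [aEncodePart, procP, endIdx, bEncode, h, if_false]
    rw [PySem.List.slice_to p h0, PySem.List.slice_from p h0]

theorem foldl_aEncodePart (l : List (List Char)) :
    ∀ init : List Char, List.foldl aEncodePart init l = init ++ l.flatMap procP := by
  induction l with
  | nil => simp
  | cons p l ih =>
    intro init
    rw [List.foldl_cons, ih, procEnc]
    simp

theorem go_step (M : List Char) (f : ℕ) (c : Char) (rest cur : List Char) (acc : List (List Char)) :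
    PySem.Chars.splitOn.go M (f+1) (c::rest) cur acc =
      if M.isPrefixOf (c::rest) then PySem.Chars.splitOn.go M f ((c::rest).drop M.length) [] (cur.reverse :: acc)
      else PySem.Chars.splitOn.go M f rest (c::cur) acc := by
  rfl

theorem go_spec (M : List Char) (hM : M ≠ []) :
    ∀ (n : ℕ) (l : List Char), l.length ≤ n → ∀ (f : ℕ) (cur : List Char) (acc : List (List Char)),
      l.length ≤ f →
      PySem.Chars.splitOn.go M f l cur acc =
        acc.reverse ++ (cur.reverse ++ (PySem.Chars.splitOn l M).headI) :: (PySem.Chars.splitOn l M).tail := by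
  intro n
  induction n with
  | zero =>
    intro l hl f cur acc hf
    have : l = [] := List.length_eq_zero_iff.mp (Nat.le_zero.mp hl)
    subst this
    cases f <;> simp [PySem.Chars.splitOn.go, PySem.Chars.splitOn]
  | succ n ih =>
    intro l hl f cur acc hf
    match l with
    | [] => cases f <;> simp [PySem.Chars.splitOn.go, PySem.Chars.splitOn]
    | c :: rest =>
      match f with
      | 0 => simp at hf
      | f + 1 =>
        have hM1 : 1 ≤ M.length := by
          cases M with
          | nil => exact absurd rfl hM
          | cons a b => simp
        simp only [List.length_cons] at hl hf
        by_cases hpre : M.isPrefixOf (c :: rest)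
        · have hdl : ((c::rest).drop M.length).length ≤ n := by
            simp only [List.length_drop, List.length_cons]; omega
          have hdf : ((c::rest).drop M.length).length ≤ f := by
            simp only [List.length_drop, List.length_cons]; omega
          have hsplit : PySem.Chars.splitOn (c::rest) M =
              [] :: (PySem.Chars.splitOn ((c::rest).drop M.length) M).headI
                 :: (PySem.Chars.splitOn ((c::rest).drop M.length) M).tail := by
            show PySem.Chars.splitOn.go M ((c::rest).length + 1) (c::rest) [] [] = _
            rw [show (c::rest).length + 1 = (rest.length + 1) + 1 by simp, go_step, if_pos hpre,
               ih _ hdl _ _ _ (by simp only [List.length_drop, List.length_cons]; omega)]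
            simp
          rw [go_step, if_pos hpre, ih _ hdl _ _ _ hdf, hsplit]
          simp
        · have hsplit : PySem.Chars.splitOn (c::rest) M =
              (c :: (PySem.Chars.splitOn rest M).headI) :: (PySem.Chars.splitOn rest M).tail := by
            show PySem.Chars.splitOn.go M ((c::rest).length + 1) (c::rest) [] [] = _
            rw [show (c::rest).length + 1 = (rest.length + 1) + 1 by simp, go_step, if_neg hpre,
               ih _ (by omega) _ _ _ (by omega)]
            simp
          rw [go_step, if_neg hpre, ih _ (by omega) _ _ _ (by omega), hsplit]
          simp

theorem splitOn_eq_cons (M : List Char) (hM : M ≠ []) (l : List Char) :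
    PySem.Chars.splitOn l M = (PySem.Chars.splitOn l M).headI :: (PySem.Chars.splitOn l M).tail := by
  conv_lhs => rw [show PySem.Chars.splitOn l M = PySem.Chars.splitOn.go M (l.length+1) l [] [] from rfl,
    go_spec M hM l.length l le_rfl (l.length+1) [] [] (by omega)]
  simp

theorem splitOn_prefix (M : List Char) (hM : M ≠ []) (l : List Char) (hpre : M <+: l) :
    PySem.Chars.splitOn l M = [] :: PySem.Chars.splitOn (l.drop M.length) M := by
  match l with
  | [] =>
    have : M = [] := List.prefix_nil.mp hpre
    exact absurd this hM
  | c :: rest =>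
    show PySem.Chars.splitOn.go M ((c::rest).length+1) (c::rest) [] [] = _
    rw [show (c::rest).length + 1 = (rest.length + 1) + 1 by simp, go_step,
      if_pos (List.isPrefixOf_iff_prefix.mpr hpre),
      go_spec M hM _ _ (le_refl ((c::rest).drop M.length).length) _ _ _
        (by simp only [List.length_drop, List.length_cons]; omega)]
    rw [splitOn_eq_cons M hM ((c::rest).drop M.length)]
    simp

theorem splitOn_not_prefix (M : List Char) (hM : M ≠ []) (c : Char) (rest : List Char)
    (h : ¬ M <+: (c :: rest)) :
    PySem.Chars.splitOn (c :: rest) M =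
      (c :: (PySem.Chars.splitOn rest M).headI) :: (PySem.Chars.splitOn rest M).tail := by
  show PySem.Chars.splitOn.go M ((c::rest).length+1) (c::rest) [] [] = _
  rw [show (c::rest).length + 1 = (rest.length + 1) + 1 by simp, go_step,
    if_neg (by rw [List.isPrefixOf_iff_prefix]; exact h),
    go_spec M hM rest.length rest le_rfl _ _ _ (by omega)]
  simp

theorem splitOn_no_occur (M : List Char) (hM : M ≠ []) (l : List Char)
    (h : ∀ j, ¬ M <+: l.drop j) : PySem.Chars.splitOn l M = [l] := by
  induction l with
  | nil =>
    simp [PySem.Chars.splitOn, PySem.Chars.splitOn.go]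
  | cons c rest ih =>
    rw [splitOn_not_prefix M hM c rest (by simpa using h 0),
      ih (fun j => by simpa using h (j+1))]
    simp

theorem splitOn_first (M : List Char) (hM : M ≠ []) (a d : List Char)
    (hmin : ∀ j < a.length, ¬ M <+: (a ++ M ++ d).drop j) :
    PySem.Chars.splitOn (a ++ M ++ d) M = a :: PySem.Chars.splitOn d M := by
  induction a with
  | nil =>
    rw [List.nil_append, splitOn_prefix M hM _ (List.prefix_append M d)]
    simp
  | cons c a' ih =>
    have h0 : ¬ M <+: (c :: (a' ++ M ++ d)) := by simpa using hmin 0 (by simp)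
    rw [List.cons_append, List.cons_append, splitOn_not_prefix M hM c _ h0,
      ih (fun j hj => by simpa using hmin (j+1) (by simp; omega))]
    simp


theorem singleton_prefix_drop (l : List Char) (j : ℕ) (hj : j < l.length) :
    (['\n'] <+: l.drop j) ↔ l[j] = '\n' := by
  rw [List.drop_eq_getElem_cons hj, List.cons_prefix_cons]
  simp [eq_comm]

theorem noNl_of_find_neg (p : List Char) (h : PySem.Chars.find p "\n".toList = -1) :
    ∀ c ∈ p, c ≠ '\n' := by
  intro c hc he
  rw [PySem.Chars.find_eq_neg_one_iff] at h
  apply h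
  obtain ⟨s, t, rfl⟩ := List.append_of_mem hc
  subst he
  exact ⟨s, t, by simp⟩

theorem take_no_nl (p : List Char) (n : ℕ) (h : ∀ i < n, ¬ ['\n'] <+: p.drop i) :
    ∀ c ∈ p.take n, c ≠ '\n' := by
  intro c hc he
  obtain ⟨i, hi, hgi⟩ := List.mem_iff_getElem.mp hc
  have hil : i < p.length := lt_of_lt_of_le hi (by simp)
  have hin : i < n := by simp at hi; omega
  apply h i hin
  rw [singleton_prefix_drop p i hil]
  rw [List.getElem_take] at hgi
  rw [hgi, he]

theorem bCapture_stop (c : Char) (rest : List Char)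
    (h : c = '\n' ∨ "URL: ".toList <+: (c :: rest)) :
    bCapture (c :: rest) = ([], c :: rest) := by
  simp only [bCapture]
  rw [if_pos]
  rcases h with h | h
  · simp [h]
  · simp only [Bool.or_eq_true]
    exact Or.inr ((PySem.Chars.startswith_iff _ _).mpr h)

theorem bCapture_copy (x t : List Char) (hnl : ∀ c ∈ x, c ≠ '\n')
    (hm : ∀ j < x.length, ¬ "URL: ".toList <+: (x ++ t).drop j) :
    bCapture (x ++ t) = (x ++ (bCapture t).1, (bCapture t).2) := by
  induction x with
  | nil => simp
  | cons c x' ih =>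
    have hc : c ≠ '\n' := hnl c (by simp)
    have h0 : ¬ "URL: ".toList <+: (c :: (x' ++ t)) := by simpa using hm 0 (by simp)
    rw [List.cons_append]
    simp only [bCapture]
    rw [if_neg (by
      simp only [Bool.or_eq_true, decide_eq_true_eq]
      push Not
      refine ⟨hc, ?_⟩
      intro hs
      exact h0 ((PySem.Chars.startswith_iff _ _).mp hs)),
      ih (fun c hc => hnl c (by simp [hc])) (fun j hj => by simpa using hm (j+1) (by simp; omega))]
    simp

theorem bLoop_nil : bLoop [] = [] := by rw [bLoop]

theorem bLoop_copy (y z : List Char)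
    (hm : ∀ j < y.length, ¬ "URL: ".toList <+: (y ++ z).drop j) :
    bLoop (y ++ z) = y ++ bLoop z := by
  induction y with
  | nil => simp
  | cons c y' ih =>
    have h0 : ¬ "URL: ".toList <+: (c :: (y' ++ z)) := by simpa using hm 0 (by simp)
    rw [List.cons_append, bLoop]
    rw [if_neg (fun hs => h0 ((PySem.Chars.startswith_iff _ _).mp hs)),
      ih (fun j hj => by simpa using hm (j+1) (by simp; omega))]
    simp

theorem bLoop_marker (d : List Char) :
    bLoop ("URL: ".toList ++ d) =
      "URL: ".toList ++ bEncode (bCapture d).1 ++ bLoop (bCapture d).2 := by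
  rw [show "URL: ".toList ++ d = 'U' :: (['R','L',':',' '] ++ d) from rfl, bLoop]
  rw [if_pos ((PySem.Chars.startswith_iff _ _).mpr (by exact List.prefix_append _ d))]
  simp


theorem bCapture_marker_head (t : List Char) :
    bCapture ("URL: ".toList ++ t) = ([], "URL: ".toList ++ t) := by
  have h := bCapture_stop 'U' (['R','L',':',' '] ++ t) (Or.inr (List.prefix_append _ _))
  simpa using h

theorem main_G : ∀ (n : ℕ), ∀ (d : List Char), d.length ≤ n →
    bLoop ("URL: ".toList ++ d) = (PySem.Chars.splitOn d "URL: ".toList).flatMap procP := by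
  intro n
  induction n using Nat.strong_induction_on with
  | _ n ih =>
  intro d hdn
  have hM : ("URL: ".toList : List Char) ≠ [] := by decide
  have hnlL : ("\n".toList : List Char) = ['\n'] := rfl
  rw [bLoop_marker d]
  by_cases hocc : PySem.Chars.find d "URL: ".toList = -1
  · -- no further marker inside d
    have hno : ∀ j, ¬ "URL: ".toList <+: d.drop j := by
      intro j hp
      rw [PySem.Chars.find_eq_neg_one_iff] at hocc
      exact hocc (hp.isInfix.trans (List.drop_suffix j d).isInfix)
    rw [splitOn_no_occur _ hM d hno]
    by_cases hnl : PySem.Chars.find d ['\n'] = -1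
    · have hcap : bCapture d = (d, []) := by
        have h1 := bCapture_copy d [] (noNl_of_find_neg d (by rw [hnlL]; exact hnl))
          (by intro j hj; simpa using hno j)
        simpa [bCapture] using h1
      rw [hcap]
      simp [procP, endIdx, hnl, bLoop_nil]
    · have h0 : 0 ≤ PySem.Chars.find d ['\n'] := by
        have := PySem.Chars.neg_one_le_find d ['\n']
        omega
      obtain ⟨hpre, hmin⟩ := PySem.Chars.find_spec (s := d) (sub := ['\n']) h0
      set i := (PySem.Chars.find d ['\n']).toNat with hidef
      have hil : i < d.length := by
        by_contra hh
        push Not at hh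
        rw [List.drop_eq_nil_iff.mpr hh] at hpre
        exact absurd (List.prefix_nil.mp hpre) (by decide)
      have hdi : d[i] = '\n' := (singleton_prefix_drop d i hil).mp hpre
      have hx : ∀ c ∈ List.take i d, c ≠ '\n' := take_no_nl d i (fun k hk => hmin k hk)
      have hcap : bCapture d = (List.take i d, List.drop i d) := by
        conv_lhs => rw [← List.take_append_drop i d]
        rw [bCapture_copy _ _ hx (by intro j hj; rw [List.take_append_drop]; exact hno j)]
        rw [List.drop_eq_getElem_cons hil, bCapture_stop _ _ (Or.inl hdi),
          ← List.drop_eq_getElem_cons hil]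
        simp
      have hrest : bLoop (List.drop i d) = List.drop i d := by
        have h2 := bLoop_copy (List.drop i d) [] (by
          intro j hj
          simp only [List.append_nil, List.drop_drop]
          exact hno (i + j))
        simpa [bLoop_nil] using h2
      rw [hcap, hrest]
      simp [procP, endIdx, hnl, ← hidef]
  · -- next marker inside d at position n0
    have h0 : 0 ≤ PySem.Chars.find d "URL: ".toList := by
      have := PySem.Chars.neg_one_le_find d "URL: ".toList
      omega
    obtain ⟨hpre, hmin⟩ := PySem.Chars.find_spec (s := d) (sub := "URL: ".toList) h0
    set n0 := (PySem.Chars.find d "URL: ".toList).toNat with hn0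
    have hn0le : n0 ≤ d.length := by
      have := PySem.Chars.find_le_length d "URL: ".toList
      exact Int.toNat_le.mpr this
    obtain ⟨t, ht⟩ := hpre
    set a := List.take n0 d with hadef
    have halen : a.length = n0 := by simp [hadef, List.length_take]; omega
    have hd_eq : d = a ++ "URL: ".toList ++ t := by
      conv_lhs => rw [← List.take_append_drop n0 d, ← ht]
      rw [List.append_assoc]
    have hlen : d.length = n0 + 5 + t.length := by
      have h5 : ("URL: ".toList).length = 5 := rfl
      conv_lhs => rw [hd_eq]
      simp [List.length_append, halen]
      omega
    rw [show PySem.Chars.splitOn d "URL: ".toList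
          = a :: PySem.Chars.splitOn t "URL: ".toList from by
      conv_lhs => rw [hd_eq]
      exact splitOn_first _ hM a t (by
        intro j hj
        rw [← hd_eq]
        exact hmin j (by omega))]
    simp only [List.flatMap_cons]
    have hIH : bLoop ("URL: ".toList ++ t)
        = (PySem.Chars.splitOn t "URL: ".toList).flatMap procP :=
      ih t.length (by omega) t le_rfl
    rw [← hIH]
    by_cases hnlA : PySem.Chars.find a ['\n'] = -1
    · have hcap : bCapture d = (a, "URL: ".toList ++ t) := by
        conv_lhs => rw [hd_eq, List.append_assoc]
        rw [bCapture_copy _ _ (noNl_of_find_neg _ (by rw [hnlL]; exact hnlA)) (by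
          intro j hj
          rw [← List.append_assoc, ← hd_eq]
          exact hmin j (by omega)),
          bCapture_marker_head]
        simp
      rw [hcap]
      simp [procP, endIdx, hnlA]
    · have h0i : 0 ≤ PySem.Chars.find a ['\n'] := by
        have := PySem.Chars.neg_one_le_find a ['\n']
        omega
      obtain ⟨hpreI, hminI⟩ := PySem.Chars.find_spec (s := a) (sub := ['\n']) h0i
      set i := (PySem.Chars.find a ['\n']).toNat with hidef
      have hiA : i < a.length := by
        by_contra hh
        push Not at hh
        rw [List.drop_eq_nil_iff.mpr hh] at hpreI
        exact absurd (List.prefix_nil.mp hpreI) (by decide)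
      have hai : a[i] = '\n' := (singleton_prefix_drop a i hiA).mp hpreI
      have hwhole : List.take i a ++ (List.drop i a ++ ("URL: ".toList ++ t)) = d := by
        rw [← List.append_assoc, List.take_append_drop, ← List.append_assoc, ← hd_eq]
      have hdij : ∀ j, (List.drop i a ++ ("URL: ".toList ++ t)).drop j = d.drop (i + j) := by
        intro j
        conv_rhs => rw [← hwhole]
        rw [List.drop_append (l₁ := List.take i a)]
        have hlt : (List.take i a).length = i := by simp [List.length_take]; omega
        have h2 : List.drop (i + j) (List.take i a) = [] := by
          rw [List.drop_eq_nil_iff]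
          omega
        rw [hlt, h2]
        have h1 : i + j - i = j := by omega
        rw [h1]
        simp
      have hcap : bCapture d = (List.take i a, List.drop i a ++ ("URL: ".toList ++ t)) := by
        conv_lhs => rw [← hwhole]
        rw [bCapture_copy _ _ (take_no_nl a i (fun k hk => hminI k hk)) (by
          intro j hj
          rw [hwhole]
          have hlt : (List.take i a).length = i := by simp [List.length_take]; omega
          exact hmin j (by omega)),
          List.drop_eq_getElem_cons hiA, List.cons_append,
          bCapture_stop _ _ (Or.inl hai), ← List.cons_append, ← List.drop_eq_getElem_cons hiA]
        simp
      have hloopy : bLoop (List.drop i a ++ ("URL: ".toList ++ t))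
          = List.drop i a ++ bLoop ("URL: ".toList ++ t) := by
        apply bLoop_copy
        intro j hj
        rw [hdij j]
        have hlend : (List.drop i a).length = a.length - i := by simp
        exact hmin (i + j) (by omega)
      rw [hcap, hloopy]
      simp [procP, endIdx, hnlA, ← hidef, List.append_assoc]

theorem bLoop_eq (cs : List Char) :
    bLoop cs = (PySem.Chars.splitOn cs "URL: ".toList).headI
      ++ (PySem.Chars.splitOn cs "URL: ".toList).tail.flatMap procP := by
  have hM : ("URL: ".toList : List Char) ≠ [] := by decide
  by_cases hocc : PySem.Chars.find cs "URL: ".toList = -1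
  · have hno : ∀ j, ¬ "URL: ".toList <+: cs.drop j := by
      intro j hp
      rw [PySem.Chars.find_eq_neg_one_iff] at hocc
      exact hocc (hp.isInfix.trans (List.drop_suffix j cs).isInfix)
    rw [splitOn_no_occur _ hM cs hno]
    have h2 := bLoop_copy cs [] (by intro j hj; simpa using hno j)
    simpa [bLoop_nil] using h2
  · have h0 : 0 ≤ PySem.Chars.find cs "URL: ".toList := by
      have := PySem.Chars.neg_one_le_find cs "URL: ".toList
      omega
    obtain ⟨hpre, hmin⟩ := PySem.Chars.find_spec (s := cs) (sub := "URL: ".toList) h0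
    set n0 := (PySem.Chars.find cs "URL: ".toList).toNat with hn0
    have hn0le : n0 ≤ cs.length := by
      have := PySem.Chars.find_le_length cs "URL: ".toList
      exact Int.toNat_le.mpr this
    obtain ⟨t, ht⟩ := hpre
    set a := List.take n0 cs with hadef
    have halen : a.length = n0 := by simp [hadef, List.length_take]; omega
    have hd_eq : cs = a ++ "URL: ".toList ++ t := by
      conv_lhs => rw [← List.take_append_drop n0 cs, ← ht]
      rw [List.append_assoc]
    rw [show PySem.Chars.splitOn cs "URL: ".toList
          = a :: PySem.Chars.splitOn t "URL: ".toList from by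
      conv_lhs => rw [hd_eq]
      exact splitOn_first _ hM a t (by
        intro j hj
        rw [← hd_eq]
        exact hmin j (by omega))]
    simp only [List.headI, List.tail_cons]
    conv_lhs => rw [hd_eq, List.append_assoc]
    rw [bLoop_copy a _ (by
      intro j hj
      rw [← List.append_assoc, ← hd_eq]
      exact hmin j (by omega)),
      main_G t.length t le_rfl]

-- ===== VERDICT (by name: the statement is the Claim_ definition above) =====
theorem encode_urls_in_references_spec : Claim_equal_encode_urls_in_references := by
  intro references _
  show (have parts := PySem.Chars.splitOn references.toList "URL: ".toList;
    String.ofList (List.foldl aEncodePart parts.headI parts.tail))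
      = String.ofList (bLoop references.toList)
  simp only []
  rw [foldl_aEncodePart, ← bLoop_eq]
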